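-- pv_equiv track=rewrite | github.com/Xie-free/Xie-tirter | love/练习题目/Python案例/鸡钱通算.py | chick
-- ===== SOURCE A (Python) =====
-- def chick(money, number):
--     for cock in range(1, number):
--         for hen in range(1, number):
--             chick_1 = number - cock - hen
--             if chick_1 % 3 == 0 and chick_1 > 0 and cock * 5 + hen * 3 + chick_1 // 3 == money:
--                 return f"公鸡:{cock}只, 母鸡{hen}只, 小鸡{chick_1}只"
--
--     else:
--         return "无解"
-- ===== SOURCE B (Python) =====
-- def chick(money, number):
--     # Solve the 2x2 linear system per cock instead of scanning all hens: O(n) vs O(n^2).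
--     for cock in range(1, number):
--         n1 = number - cock        # hen + chick
--         m1 = money - 5 * cock     # 3*hen + chick//3
--         hnum = 3 * m1 - n1        # = 8*hen when chick = 3k
--         if hnum % 8 == 0:
--             hen = hnum // 8
--             k = (3 * n1 - m1) // 8
--             if hen >= 1 and k >= 1:
--                 return f"公鸡:{cock}只, 母鸡{hen}只, 小鸡{3 * k}只"
--     return "无解"
-- ===== Notes on version B (the rewrite author's own statement) =====
-- stated objective: faster
-- what changed: Replaced A's inner brute-force scan over all hen values by solving the 2x2 linear system for hen and chick directly per cock, turning the nested loops into a single loop.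
import Mathlib
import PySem

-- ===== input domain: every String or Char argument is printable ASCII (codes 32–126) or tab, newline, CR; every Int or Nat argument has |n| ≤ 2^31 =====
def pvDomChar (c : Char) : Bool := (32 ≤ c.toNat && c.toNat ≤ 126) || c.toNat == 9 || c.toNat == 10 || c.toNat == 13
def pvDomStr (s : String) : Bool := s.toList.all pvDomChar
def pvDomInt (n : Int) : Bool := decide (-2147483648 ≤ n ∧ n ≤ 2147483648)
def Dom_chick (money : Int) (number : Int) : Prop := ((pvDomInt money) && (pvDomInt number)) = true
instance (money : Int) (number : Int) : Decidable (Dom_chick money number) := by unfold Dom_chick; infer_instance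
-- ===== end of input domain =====

-- B replaces A's inner brute-force scan over all hen values by solving the 2x2 linear system
-- for hen and chick directly per cock, turning the nested loops into a single loop.

-- the f-string both Pythons share
def chickFmt (cock hen c1 : Int) : String :=
  "公鸡:" ++ PySem.Int.toStr cock ++ "只, 母鸡" ++ PySem.Int.toStr hen ++ "只, 小鸡" ++ PySem.Int.toStr c1 ++ "只"

-- ===== PORT A =====
-- 'for hen in range(1, number)' with early return: hen starts at 1, the fuel is the
-- iteration count (number-1).toNat of Python's range
def chickInner (money number cock : Int) : Nat → Int → Option String
  | 0, _ => none
  | fuel + 1, hen =>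
    let c1 := number - cock - hen
    if PySem.Int.mod c1 3 = 0 ∧ c1 > 0 ∧ cock * 5 + hen * 3 + PySem.Int.floordiv c1 3 = money then
      some (chickFmt cock hen c1)
    else chickInner money number cock fuel (hen + 1)

-- 'for cock in range(1, number)' with early return
def chickOuterGo (money number : Int) : Nat → Int → String
  | 0, _ => "无解"
  | fuel + 1, cock =>
    match chickInner money number cock (number - 1).toNat 1 with
    | some s => s
    | none => chickOuterGo money number fuel (cock + 1)

def chick (money : Int) (number : Int) : String :=
  chickOuterGo money number (number - 1).toNat 1

-- ===== PORT B =====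
def chickAltGo (money number : Int) : Nat → Int → String
  | 0, _ => "无解"
  | fuel + 1, cock =>
    let n1 := number - cock
    let m1 := money - 5 * cock
    let hnum := 3 * m1 - n1
    if PySem.Int.mod hnum 8 = 0 then
      let hen := PySem.Int.floordiv hnum 8
      let k := PySem.Int.floordiv (3 * n1 - m1) 8
      if hen ≥ 1 ∧ k ≥ 1 then chickFmt cock hen (3 * k)
      else chickAltGo money number fuel (cock + 1)
    else chickAltGo money number fuel (cock + 1)

def chick_alt (money : Int) (number : Int) : String :=
  chickAltGo money number (number - 1).toNat 1

-- ===== PRECONDITION & SPEC =====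
def Spec_chick (money : Int) (number : Int) (out : String) : Prop := out = chick_alt money number
instance (money : Int) (number : Int) (out : String) : Decidable (Spec_chick money number out) := by unfold Spec_chick; infer_instance

-- ===== CLAIM (what is proved, stated in full; the proofs are below) =====
def Claim_equal_chick : Prop := ∀ (money : Int) (number : Int), Dom_chick money number → Spec_chick money number (chick money number)

-- ===== LEMMAS AND PROOFS =====

-- A's inner-loop success condition on a candidate hen
abbrev chickP (money number cock hen : Int) : Prop :=
  PySem.Int.mod (number - cock - hen) 3 = 0 ∧ number - cock - hen > 0 ∧
    cock * 5 + hen * 3 + PySem.Int.floordiv (number - cock - hen) 3 = money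

lemma chickInner_step (money number cock : Int) (fuel : Nat) (hen : Int) :
    chickInner money number cock (fuel + 1) hen =
      if chickP money number cock hen then
        some (chickFmt cock hen (number - cock - hen))
      else chickInner money number cock fuel (hen + 1) := by
  rfl

lemma inner_none (money number cock : Int) (fuel : Nat) (hen : Int)
    (h : ∀ x, hen ≤ x → x < hen + fuel → ¬ chickP money number cock x) :
    chickInner money number cock fuel hen = none := by
  induction fuel generalizing hen with
  | zero => rfl
  | succ n ih =>
    rw [chickInner_step, if_neg (h hen le_rfl (by omega))]
    exact ih (hen + 1) fun x hx hx' => h x (by omega) (by push_cast at hx' ⊢; omega)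

lemma inner_some (money number cock : Int) (fuel : Nat) (hen hen0 : Int)
    (hle : hen ≤ hen0) (hlt : hen0 < hen + fuel)
    (hp : chickP money number cock hen0)
    (huniq : ∀ x, chickP money number cock x → x = hen0) :
    chickInner money number cock fuel hen = some (chickFmt cock hen0 (number - cock - hen0)) := by
  induction fuel generalizing hen with
  | zero => omega
  | succ n ih =>
    rw [chickInner_step]
    by_cases hx : chickP money number cock hen
    · rw [if_pos hx, huniq hen hx]
    · rw [if_neg hx]
      have hne : hen ≠ hen0 := fun he => hx (he ▸ hp)
      exact ih (hen + 1) (by omega) (by push_cast at hlt ⊢; omega)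

lemma go_eq (money number : Int) (fuel : Nat) (cock : Int) (hc : 1 ≤ cock) :
    chickOuterGo money number fuel cock = chickAltGo money number fuel cock := by
  induction fuel generalizing cock with
  | zero => rfl
  | succ n ih =>
    have e8m : PySem.Int.mod (3 * (money - 5 * cock) - (number - cock)) 8 =
        (3 * (money - 5 * cock) - (number - cock)) % 8 :=
      PySem.Int.mod_eq_emod_of_pos (by norm_num)
    have e8d : PySem.Int.floordiv (3 * (money - 5 * cock) - (number - cock)) 8 =
        (3 * (money - 5 * cock) - (number - cock)) / 8 :=
      PySem.Int.floordiv_eq_ediv_of_pos (by norm_num)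
    have e8d' : PySem.Int.floordiv (3 * (number - cock) - (money - 5 * cock)) 8 =
        (3 * (number - cock) - (money - 5 * cock)) / 8 :=
      PySem.Int.floordiv_eq_ediv_of_pos (by norm_num)
    have pchar : ∀ x : Int, chickP money number cock x ↔
        ((number - cock - x) % 3 = 0 ∧ number - cock - x > 0 ∧
          cock * 5 + x * 3 + (number - cock - x) / 3 = money) := by
      intro x
      unfold chickP
      rw [PySem.Int.mod_eq_emod_of_pos (by norm_num : (0:Int) < 3),
          PySem.Int.floordiv_eq_ediv_of_pos (by norm_num : (0:Int) < 3)]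
    have ih' : chickOuterGo money number n (cock + 1) = chickAltGo money number n (cock + 1) :=
      ih (cock + 1) (by omega)
    show (match chickInner money number cock (number - 1).toNat 1 with
          | some s => s
          | none => chickOuterGo money number n (cock + 1)) = chickAltGo money number (n + 1) cock
    rw [chickAltGo]
    by_cases h8 : PySem.Int.mod (3 * (money - 5 * cock) - (number - cock)) 8 = 0
    · have hdvd : (3 * (money - 5 * cock) - (number - cock)) % 8 = 0 := by rw [← e8m]; exact h8
      rw [if_pos h8, e8d, e8d']
      by_cases hok : (3 * (money - 5 * cock) - (number - cock)) / 8 ≥ 1 ∧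
          (3 * (number - cock) - (money - 5 * cock)) / 8 ≥ 1
      · rw [if_pos hok]
        have hb : 1 ≤ (3 * (money - 5 * cock) - (number - cock)) / 8 ∧
            (3 * (money - 5 * cock) - (number - cock)) / 8 < 1 + ((number - 1).toNat : Int) := by
          omega
        have hp : chickP money number cock ((3 * (money - 5 * cock) - (number - cock)) / 8) := by
          rw [pchar]; omega
        have huniq : ∀ x, chickP money number cock x →
            x = (3 * (money - 5 * cock) - (number - cock)) / 8 := by
          intro x hx; rw [pchar] at hx; omega
        rw [inner_some money number cock (number - 1).toNat 1 _ hb.1 hb.2 hp huniq]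
        have h3 : number - cock - (3 * (money - 5 * cock) - (number - cock)) / 8 =
            3 * ((3 * (number - cock) - (money - 5 * cock)) / 8) := by omega
        rw [h3]
      · rw [if_neg hok]
        have hnone : ∀ x, (1:Int) ≤ x → x < 1 + ((number - 1).toNat : Int) →
            ¬ chickP money number cock x := by
          intro x hx1 _ hx; rw [pchar] at hx; omega
        rw [inner_none money number cock (number - 1).toNat 1 hnone]
        exact ih'
    · rw [if_neg h8]
      have hnd : (3 * (money - 5 * cock) - (number - cock)) % 8 ≠ 0 := by rw [← e8m]; exact h8
      have hnone : ∀ x, (1:Int) ≤ x → x < 1 + ((number - 1).toNat : Int) →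
          ¬ chickP money number cock x := by
        intro x hx1 _ hx; rw [pchar] at hx; omega
      rw [inner_none money number cock (number - 1).toNat 1 hnone]
      exact ih'

-- ===== VERDICT (by name: the statement is the Claim_ definition above) =====
theorem chick_spec : Claim_equal_chick := by
  intro money number _
  unfold Spec_chick chick chick_alt
  exact go_eq money number (number - 1).toNat 1 le_rfl
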